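-- pv_equiv track=rewrite | github.com/walsons/biometrics_ecg | ecg_dataset.py | load_dataset_with_start_end
-- ===== SOURCE A (Python) =====
-- def load_dataset_with_start_end(dataset, start, end):
--     ecgdata, target = dataset
--     res_ecgdata = []
--     res_target = []
--     for a, b in zip(ecgdata, target):
--         if b >= end:
--             break
--         elif b >= start:
--             res_ecgdata.append(a)
--             res_target.append(b)
--     return res_ecgdata, res_target
-- ===== SOURCE B (Python) =====
-- def load_dataset_with_start_end(dataset, start, end):
--     ecgdata, target = dataset
--     pairs = list(zip(ecgdata, target))
--     cut = next((i for i, (_, b) in enumerate(pairs) if b >= end), len(pairs))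
--     kept = [p for p in pairs[:cut] if p[1] >= start]
--     return [a for a, _ in kept], [b for _, b in kept]
-- ===== Notes on version B (the rewrite author's own statement) =====
-- stated objective: alternative
-- what changed: B first locates the break boundary (first target >= end) as an index, then slices the zipped pairs, filters by start and unzips with comprehensions, instead of A's single loop with break and two append-accumulators.
import Mathlib
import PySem

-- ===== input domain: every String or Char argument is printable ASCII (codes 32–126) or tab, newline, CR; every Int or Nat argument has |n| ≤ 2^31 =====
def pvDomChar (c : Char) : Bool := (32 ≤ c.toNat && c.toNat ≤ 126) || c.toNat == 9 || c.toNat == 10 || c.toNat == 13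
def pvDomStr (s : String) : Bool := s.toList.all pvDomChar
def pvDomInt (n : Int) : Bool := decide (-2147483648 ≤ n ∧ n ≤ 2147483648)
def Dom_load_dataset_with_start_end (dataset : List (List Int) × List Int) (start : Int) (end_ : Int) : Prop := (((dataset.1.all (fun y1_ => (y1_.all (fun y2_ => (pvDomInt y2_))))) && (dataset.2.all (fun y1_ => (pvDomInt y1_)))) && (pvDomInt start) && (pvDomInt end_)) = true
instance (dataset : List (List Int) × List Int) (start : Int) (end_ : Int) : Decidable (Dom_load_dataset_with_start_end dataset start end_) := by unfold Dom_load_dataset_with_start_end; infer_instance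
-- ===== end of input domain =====

-- B finds the break boundary as an index first, then slices/filters/unzips; same O(n) cost, different decomposition.
-- ===== PORT A =====
-- the for-loop over zip(ecgdata, target) with break and two append-accumulators
def pvGoA (start end_ : Int) : List (List Int × Int) → List (List Int) × List Int
  | [] => ([], [])
  | (a, b) :: rest =>
    if b ≥ end_ then ([], [])
    else if b ≥ start then
      let r := pvGoA start end_ rest
      (a :: r.1, b :: r.2)
    else pvGoA start end_ rest

def load_dataset_with_start_end (dataset : List (List Int) × List Int) (start : Int) (end_ : Int) : List (List Int) × List Int :=
  pvGoA start end_ (dataset.1.zip dataset.2)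

-- ===== PORT B =====
-- the generator scan `next((i for i, (_, b) in enumerate(pairs) if b >= end), len(pairs))`:
-- index of the first pair with b >= end, else the length
def pvCut (end_ : Int) : List (List Int × Int) → Nat
  | [] => 0
  | p :: rest => if p.2 ≥ end_ then 0 else pvCut end_ rest + 1

def load_dataset_with_start_end_alt (dataset : List (List Int) × List Int) (start : Int) (end_ : Int) : List (List Int) × List Int :=
  let pairs := dataset.1.zip dataset.2
  let kept := (pairs.take (pvCut end_ pairs)).filter (fun p => p.2 ≥ start)
  (kept.map Prod.fst, kept.map Prod.snd)

-- ===== PRECONDITION & SPEC =====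
def Spec_load_dataset_with_start_end (dataset : List (List Int) × List Int) (start : Int) (end_ : Int) (out : List (List Int) × List Int) : Prop := out = load_dataset_with_start_end_alt dataset start end_
instance (dataset : List (List Int) × List Int) (start : Int) (end_ : Int) (out : List (List Int) × List Int) : Decidable (Spec_load_dataset_with_start_end dataset start end_ out) := by unfold Spec_load_dataset_with_start_end; infer_instance

-- ===== CLAIM (what is proved, stated in full; the proofs are below) =====
def Claim_equal_load_dataset_with_start_end : Prop := ∀ (dataset : List (List Int) × List Int) (start : Int) (end_ : Int), Dom_load_dataset_with_start_end dataset start end_ → Spec_load_dataset_with_start_end dataset start end_ (load_dataset_with_start_end dataset start end_)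

-- ===== LEMMAS AND PROOFS =====
theorem pvGoA_eq (start end_ : Int) (zs : List (List Int × Int)) :
    pvGoA start end_ zs =
      (((zs.take (pvCut end_ zs)).filter (fun p => p.2 ≥ start)).map Prod.fst,
       ((zs.take (pvCut end_ zs)).filter (fun p => p.2 ≥ start)).map Prod.snd) := by
  induction zs with
  | nil => simp [pvGoA, pvCut]
  | cons p zs ih =>
    obtain ⟨a, b⟩ := p
    by_cases hb : b ≥ end_
    · simp [pvGoA, pvCut, hb]
    · by_cases hs : b ≥ start
      · simp [pvGoA, pvCut, hb, hs, ih]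
      · simp [pvGoA, pvCut, hb, hs, ih]

-- ===== VERDICT (by name: the statement is the Claim_ definition above) =====
theorem load_dataset_with_start_end_spec : Claim_equal_load_dataset_with_start_end := by
  intro dataset start end_ _
  unfold Spec_load_dataset_with_start_end load_dataset_with_start_end load_dataset_with_start_end_alt
  exact pvGoA_eq start end_ (dataset.1.zip dataset.2)
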